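-- pv_equiv track=rewrite | github.com/Eugegeuge/portfolio-hugo | mathsolver-repo-temp/src/digitRecognition.py | cambiar_signos_der
-- ===== SOURCE A (Python) =====
-- def cambiar_signos_der (ecuacion):
--
--     changed_signos = ""
--     in_parentesis = False
--     i = 0
--
--     while(i < len(ecuacion)):
--
--         if (ecuacion[i] == '('):    # Se abre parentesis
--             in_parentesis = True
--             changed_signos += '('
--
--         elif (ecuacion[i] == ')'):    # Se cierra el parentesis
--             in_parentesis = False
--             changed_signos += ')'
--
--         else:
--             if (not in_parentesis):
--                 if (ecuacion[i] == '+'):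
--                     changed_signos += '-'
--                 elif (ecuacion[i] == '-'):
--                     changed_signos += '+'
--                 else:
--                     changed_signos += ecuacion[i]
--             else:
--                 changed_signos += ecuacion[i]
--
--         i += 1
--     return ''.join(changed_signos)
-- ===== SOURCE B (Python) =====
-- def cambiar_signos_der(ecuacion):
--     trans = str.maketrans('+-', '-+')
--     # tokenize: each parenthesis is its own token, text between parens is one segment
--     tokens = []
--     cur = []
--     for c in ecuacion:
--         if c == '(' or c == ')':
--             tokens.append(''.join(cur))
--             cur = []
--             tokens.append(c)
--         else:
--             cur.append(c)
--     tokens.append(''.join(cur))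
--     out = []
--     outside = True
--     for tok in tokens:
--         if tok == '(':
--             outside = False
--             out.append(tok)
--         elif tok == ')':
--             outside = True
--             out.append(tok)
--         else:
--             out.append(tok.translate(trans) if outside else tok)
--     return ''.join(out)
-- ===== Notes on version B (the rewrite author's own statement) =====
-- stated objective: faster
-- what changed: B tokenizes the string into parenthesis tokens and intervening segments, translating whole outside segments with a str.maketrans table and joining a list at the end, instead of A's per-character sign branching with quadratic string concatenation.
import Mathlib
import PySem

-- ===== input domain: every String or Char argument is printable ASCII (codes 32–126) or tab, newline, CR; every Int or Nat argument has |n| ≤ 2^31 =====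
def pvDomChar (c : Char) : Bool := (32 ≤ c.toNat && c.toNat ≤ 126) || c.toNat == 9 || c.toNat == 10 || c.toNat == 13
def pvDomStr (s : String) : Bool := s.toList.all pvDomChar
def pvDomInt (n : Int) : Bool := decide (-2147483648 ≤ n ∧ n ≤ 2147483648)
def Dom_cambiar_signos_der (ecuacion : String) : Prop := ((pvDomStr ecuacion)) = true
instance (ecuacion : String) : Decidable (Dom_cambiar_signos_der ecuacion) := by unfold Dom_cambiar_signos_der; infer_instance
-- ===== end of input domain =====

-- B tokenizes the equation into parenthesis tokens and intervening segments, translating whole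
-- outside segments and joining once, replacing A's per-character loop with quadratic string
-- concatenation (objective: faster, measured).


-- ===== PORT A =====
-- A's while loop: accumulator `acc` is changed_signos, `inP` is in_parentesis.
def pvLoopA : List Char → List Char → Bool → List Char
  | [], acc, _ => acc
  | c :: rest, acc, inP =>
    if c = '(' then pvLoopA rest (acc ++ ['(']) true
    else if c = ')' then pvLoopA rest (acc ++ [')']) false
    else if inP = false then
      if c = '+' then pvLoopA rest (acc ++ ['-']) inP
      else if c = '-' then pvLoopA rest (acc ++ ['+']) inP
      else pvLoopA rest (acc ++ [c]) inP
    else pvLoopA rest (acc ++ [c]) inP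

def cambiar_signos_der (ecuacion : String) : String :=
  String.ofList (pvLoopA ecuacion.toList [] false)

-- ===== PORT B =====
-- the str.maketrans('+-','-+') table
def pvTransl (c : Char) : Char := if c = '+' then '-' else if c = '-' then '+' else c

-- tokenize: each parenthesis its own token, text between parens one segment
def pvTokenize : List Char → List Char → List (List Char)
  | [], cur => [cur]
  | c :: rest, cur =>
    if c = '(' ∨ c = ')' then cur :: [c] :: pvTokenize rest []
    else pvTokenize rest (cur ++ [c])

-- second loop of B: walk tokens with the `outside` flag
def pvProcess : List (List Char) → Bool → List Char
  | [], _ => []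
  | tok :: rest, outside =>
    if tok = ['('] then '(' :: pvProcess rest false
    else if tok = [')'] then ')' :: pvProcess rest true
    else (if outside then tok.map pvTransl else tok) ++ pvProcess rest outside

def cambiar_signos_der_alt (ecuacion : String) : String :=
  String.ofList (pvProcess (pvTokenize ecuacion.toList []) true)

-- ===== PRECONDITION & SPEC =====
def Spec_cambiar_signos_der (ecuacion : String) (out : String) : Prop := out = cambiar_signos_der_alt ecuacion
instance (ecuacion : String) (out : String) : Decidable (Spec_cambiar_signos_der ecuacion out) := by unfold Spec_cambiar_signos_der; infer_instance

-- ===== CLAIM (what is proved, stated in full; the proofs are below) =====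
def Claim_equal_cambiar_signos_der : Prop := ∀ (ecuacion : String), Dom_cambiar_signos_der ecuacion → Spec_cambiar_signos_der ecuacion (cambiar_signos_der ecuacion)

-- ===== LEMMAS AND PROOFS =====

-- proof-side direct form of A's character transformation
def pvGoD : List Char → Bool → List Char
  | [], _ => []
  | c :: rest, inP =>
    if c = '(' then '(' :: pvGoD rest true
    else if c = ')' then ')' :: pvGoD rest false
    else (if inP then c else pvTransl c) :: pvGoD rest inP

theorem pvLoopA_eq_goD (l : List Char) : ∀ (acc : List Char) (inP : Bool),
    pvLoopA l acc inP = acc ++ pvGoD l inP := by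
  induction l with
  | nil => intro acc inP; simp [pvLoopA, pvGoD]
  | cons c rest ih =>
    intro acc inP
    by_cases h1 : c = '('
    · simp [pvLoopA, pvGoD, h1, ih]
    by_cases h2 : c = ')'
    · simp [pvLoopA, pvGoD, h1, h2, ih]
    cases inP with
    | false =>
      by_cases h3 : c = '+'
      · simp [pvLoopA, pvGoD, pvTransl, h1, h2, h3, ih]
      by_cases h4 : c = '-'
      · simp [pvLoopA, pvGoD, pvTransl, h1, h2, h3, h4, ih]
      · simp [pvLoopA, pvGoD, pvTransl, h1, h2, h3, h4, ih]
    | true => simp [pvLoopA, pvGoD, h1, h2, ih]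

theorem pvProcess_tokenize (l : List Char) : ∀ (cur : List Char) (inP : Bool),
    '(' ∉ cur → ')' ∉ cur →
    pvProcess (pvTokenize l cur) (!inP) =
      (if inP then cur else cur.map pvTransl) ++ pvGoD l inP := by
  induction l with
  | nil =>
    intro cur inP h1 h2
    have hne1 : cur ≠ ['('] := by rintro rfl; simp at h1
    have hne2 : cur ≠ [')'] := by rintro rfl; simp at h2
    cases inP <;> simp [pvTokenize, pvProcess, pvGoD, hne1, hne2]
  | cons c rest ih =>
    intro cur inP h1 h2
    have hne1 : cur ≠ ['('] := by rintro rfl; simp at h1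
    have hne2 : cur ≠ [')'] := by rintro rfl; simp at h2
    by_cases hc1 : c = '('
    · subst hc1
      have h := ih [] true (by simp) (by simp)
      simp only [Bool.not_true] at h
      cases inP <;>
        simp [pvTokenize, pvProcess, pvGoD, hne1, hne2, h]
    by_cases hc2 : c = ')'
    · subst hc2
      have h := ih [] false (by simp) (by simp)
      simp only [Bool.not_false] at h
      cases inP <;>
        simp [pvTokenize, pvProcess, pvGoD, hne1, hne2, hc1, h]
    · have h := ih (cur ++ [c]) inP (by simp [h1, Ne.symm hc1]) (by simp [h2, Ne.symm hc2])
      cases inP <;>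
        simp_all [pvTokenize, pvGoD]

-- ===== VERDICT (by name: the statement is the Claim_ definition above) =====
theorem cambiar_signos_der_spec : Claim_equal_cambiar_signos_der := by
  intro e _
  unfold Spec_cambiar_signos_der cambiar_signos_der cambiar_signos_der_alt
  rw [pvLoopA_eq_goD]
  have := pvProcess_tokenize e.toList [] false (by simp) (by simp)
  simp at this
  simp [this]
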